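-- pv_equiv track=rewrite | github.com/zhengli0817/ProgrammingInterviewQuestions | PackApple.py | PackApple
-- ===== SOURCE A (Python) =====
-- BASKETCAPACITY = 5000
--
-- def PackApple(basketAndApples):
--     if len(basketAndApples)<=1: return 0
--     basketSize = BASKETCAPACITY - basketAndApples[0]
--     apples = basketAndApples[1:]
--     count = 0
--     totalWeight = 0
--     for apple in sorted(apples):
--         totalWeight += apple
--         if totalWeight>basketSize: break
--         count += 1
--     return count
-- ===== SOURCE B (Python) =====
-- BASKETCAPACITY = 5000
--
-- def PackApple(basketAndApples):
--     if len(basketAndApples) <= 1: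
--         return 0
--     basketSize = BASKETCAPACITY - basketAndApples[0]
--     apples = basketAndApples[1:]
--     count = 0
--     totalWeight = 0
--     while apples:
--         m = min(apples)
--         totalWeight += m
--         if totalWeight > basketSize:
--             break
--         apples.remove(m)
--         count += 1
--     return count
-- ===== Notes on version B (the rewrite author's own statement) =====
-- stated objective: alternative
-- what changed: B never sorts: it keeps the apples as an unsorted pool and repeatedly extracts the minimum with min()/remove() (lazy selection), stopping as soon as the running total exceeds the capacity, instead of A's single pass over sorted(apples).
import Mathlib
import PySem

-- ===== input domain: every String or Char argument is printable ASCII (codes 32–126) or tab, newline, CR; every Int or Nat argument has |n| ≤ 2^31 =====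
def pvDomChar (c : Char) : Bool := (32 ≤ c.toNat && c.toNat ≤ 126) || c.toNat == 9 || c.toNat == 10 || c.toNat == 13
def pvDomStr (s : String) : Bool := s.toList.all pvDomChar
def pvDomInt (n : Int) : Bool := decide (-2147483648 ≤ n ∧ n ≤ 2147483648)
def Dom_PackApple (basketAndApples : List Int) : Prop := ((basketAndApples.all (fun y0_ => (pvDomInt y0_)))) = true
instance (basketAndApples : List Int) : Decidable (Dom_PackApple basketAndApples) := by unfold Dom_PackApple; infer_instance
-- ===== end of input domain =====

-- B replaces A's sort-then-scan by lazy selection over an unsorted pool (repeated min extraction with early stop): an alternative algorithm of similar cost.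
-- ===== PORT A =====
-- A's for-loop over sorted(apples) with break, carrying (count, totalWeight)
def packLoopA (basketSize : Int) : List Int → Int → Int → Int
  | [], count, _ => count
  | apple :: rest, count, totalWeight =>
    let totalWeight := totalWeight + apple
    if totalWeight > basketSize then count
    else packLoopA basketSize rest (count + 1) totalWeight

def PackApple (basketAndApples : List Int) : Int :=
  if basketAndApples.length ≤ 1 then 0
  else
    let basketSize := 5000 - basketAndApples.headI
    let apples := PySem.List.slice basketAndApples (some 1) none
    packLoopA basketSize (PySem.List.sorted apples (fun x => x) false) 0 0

-- ===== PORT B =====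
-- Source B's while-loop: m = min(apples); add; break if over; apples.remove(m); count += 1
def selLoopB (basketSize : Int) (apples : List Int) (count totalWeight : Int) : Int :=
  match hm : PySem.List.min? apples (fun x => x) with
  | none => count                                   -- while-condition false: pool empty
  | some m =>
    let totalWeight := totalWeight + m
    if totalWeight > basketSize then count
    else
      match hr : PySem.List.remove? apples m with
      | none => count                               -- unreachable: m ∈ apples
      | some rest => selLoopB basketSize rest (count + 1) totalWeight
termination_by apples.length
decreasing_by
  have hmem : m ∈ apples := PySem.List.min?_mem hm
  have h2 := PySem.List.remove?_eq_some_erase apples m hmem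
  rw [h2] at hr
  cases hr
  have h3 := List.length_erase_of_mem hmem
  have h4 : 0 < apples.length := List.length_pos_of_mem hmem
  omega

def PackApple_alt (basketAndApples : List Int) : Int :=
  if basketAndApples.length ≤ 1 then 0
  else
    let basketSize := 5000 - basketAndApples.headI
    let apples := PySem.List.slice basketAndApples (some 1) none
    selLoopB basketSize apples 0 0

-- ===== PRECONDITION & SPEC =====
def Spec_PackApple (basketAndApples : List Int) (out : Int) : Prop := out = PackApple_alt basketAndApples
instance (basketAndApples : List Int) (out : Int) : Decidable (Spec_PackApple basketAndApples out) := by unfold Spec_PackApple; infer_instance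

-- ===== CLAIM (what is proved, stated in full; the proofs are below) =====
def Claim_equal_PackApple : Prop := ∀ (basketAndApples : List Int), Dom_PackApple basketAndApples → Spec_PackApple basketAndApples (PackApple basketAndApples)

-- ===== LEMMAS AND PROOFS =====

-- sorted l = min :: sorted (l.erase min): extracting the minimum names the head of the sorted order
theorem sorted_eq_min_cons (l : List Int) (m : Int)
    (hm : PySem.List.min? l (fun x => x) = some m) :
    PySem.List.sorted l (fun x => x) false
      = m :: PySem.List.sorted (l.erase m) (fun x => x) false := by
  have hmem : m ∈ l := PySem.List.min?_mem hm
  have hmin : ∀ y ∈ l, m ≤ y := fun y hy => PySem.List.min?_isMin hm y hy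
  apply PySem.List.sorted_id_eq_of_perm_of_pairwise
  · exact ((List.perm_cons m).mpr (PySem.List.sorted_perm _ _ _)).trans
      (List.perm_cons_erase hmem).symm
  · refine List.pairwise_cons.mpr ⟨fun y hy => ?_, ?_⟩
    · exact hmin y (List.mem_of_mem_erase ((PySem.List.mem_sorted _ _ _ _).mp hy))
    · exact PySem.List.sorted_pairwise _ _

-- A's pass over the sorted list equals B's lazy selection loop
theorem loopA_eq_selLoopB (basketSize : Int) (l : List Int) :
    ∀ (count totalWeight : Int),
      packLoopA basketSize (PySem.List.sorted l (fun x => x) false) count totalWeight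
        = selLoopB basketSize l count totalWeight := by
  induction hn : l.length using Nat.strong_induction_on generalizing l with
  | _ n ih =>
  intro c t
  rw [selLoopB.eq_def]
  cases hm : PySem.List.min? l (fun x => x) with
  | none =>
    have : l = [] := (PySem.List.min?_eq_none_iff _ _).mp hm
    subst this
    simp [packLoopA, PySem.List.sorted]
  | some m =>
    have hmem : m ∈ l := PySem.List.min?_mem hm
    rw [sorted_eq_min_cons l m hm]
    simp only [packLoopA]
    by_cases h : t + m > basketSize
    · simp [h]
    · simp only [h, if_false]
      split
      · next hr => exact absurd hmem ((PySem.List.remove?_eq_none_iff l m).mp hr)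
      · next rest hr =>
          rw [PySem.List.remove?_eq_some_erase l m hmem] at hr
          cases hr
          subst hn
          have hlt : (l.erase m).length < l.length := by
            have h3 := List.length_erase_of_mem hmem
            have h4 : 0 < l.length := List.length_pos_of_mem hmem
            omega
          exact ih (l.erase m).length hlt _ rfl _ _

-- ===== VERDICT (by name: the statement is the Claim_ definition above) =====
theorem PackApple_spec : Claim_equal_PackApple := by
  intro l _
  unfold Spec_PackApple PackApple PackApple_alt
  by_cases h : l.length ≤ 1
  · simp [h]
  · simp only [h, if_false]
    exact loopA_eq_selLoopB _ _ _ _
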